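-- pv_equiv track=rewrite | github.com/amitkhotele/GeeksforGeeks-POTD | June 2025 Solutions/June-08.py | isSumString
-- ===== SOURCE A (Python) =====
-- def isSumString(s: str) -> bool:
--     def is_valid(a: str) -> bool:
--         return len(a) == 1 or a[0] != '0'
--
--     def helper(a: str, b: str, remaining: str) -> bool:
--         if not is_valid(a) or not is_valid(b):
--             return False
--
--         sum_val = str(int(a) + int(b))
--         if not remaining.startswith(sum_val):
--             return False
--
--         if remaining == sum_val:
--             return True  # We've reached the end successfully
--
--         return helper(b, sum_val, remaining[len(sum_val):])
--
--     n = len(s)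
--     for i in range(1, n):  # First number ends at i
--         for j in range(i+1, n):  # Second number ends at j
--             a = s[:i]
--             b = s[i:j]
--             remaining = s[j:]
--             if helper(a, b, remaining):
--                 return True
--     return False
-- ===== SOURCE B (Python) =====
-- def isSumString(s: str) -> bool:
--     n = len(s)
--     for i in range(1, n):
--         a = s[:i]
--         if len(a) > 1 and a[0] == '0':
--             continue
--         for j in range(i + 1, n):
--             b = s[i:j]
--             if len(b) > 1 and b[0] == '0':
--                 continue
--             # build the whole candidate sum-sequence string and compare once
--             t = s[:j]
--             x, y = a, b
--             while len(t) < n: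
--                 nxt = str(int(x) + int(y))
--                 t += nxt
--                 x, y = y, nxt
--             if t == s:
--                 return True
--     return False
-- ===== Notes on version B (the rewrite author's own statement) =====
-- stated objective: alternative
-- what changed: The recursive prefix-consuming helper is replaced by an iterative build-and-compare loop that generates the whole candidate sum-sequence string from the first two numbers and compares it with s once, with the leading-zero validity check hoisted to the initial pair only (later terms come from str(int(..)+int(..)) and can never have a leading zero).
-- outside the precondition, e.g. on isSumString('12a'): A returns False, B returns False
import Mathlib
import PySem

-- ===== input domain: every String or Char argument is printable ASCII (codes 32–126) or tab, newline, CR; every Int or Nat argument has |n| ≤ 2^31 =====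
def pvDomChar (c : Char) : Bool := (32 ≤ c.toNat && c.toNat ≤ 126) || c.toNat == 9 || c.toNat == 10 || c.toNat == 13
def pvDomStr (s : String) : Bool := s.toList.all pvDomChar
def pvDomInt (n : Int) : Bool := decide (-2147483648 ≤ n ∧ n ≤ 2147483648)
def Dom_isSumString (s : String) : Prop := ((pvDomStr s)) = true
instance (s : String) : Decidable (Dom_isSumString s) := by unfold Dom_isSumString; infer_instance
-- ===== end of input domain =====

-- B replaces A's recursive prefix-consuming helper by an iterative build-and-compare loop
-- (generate the whole candidate sequence string, compare it with s once) and checks the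
-- leading-zero rule only on the initial pair; objective: alternative (same asymptotic cost).

-- ===== PORT A =====
-- The next three lemmas are needed by the ports' `decreasing_by` proofs (str(n) is never
-- empty), so they stay above the ports, which cite pvToChars_ne_nil by name.
theorem pvToDigitsCore_head (fuel n : Nat) (ds : List Char) (hf : 0 < fuel) (hb : n < 10 ^ fuel) :
    ∃ c t, Nat.toDigitsCore 10 fuel n ds = c :: t ∧
      ((n < 10 ∧ c = Nat.digitChar n ∧ t = ds) ∨ (10 ≤ n ∧ c ≠ '0')) := by
  induction fuel generalizing n ds with
  | zero => omega
  | succ fuel ih =>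
    unfold Nat.toDigitsCore
    by_cases h0 : n / 10 = 0
    · have hn : n < 10 := Nat.lt_of_div_eq_zero (by norm_num) h0
      exact ⟨Nat.digitChar (n % 10), ds, by simp [h0],
        Or.inl ⟨hn, by rw [Nat.mod_eq_of_lt hn], rfl⟩⟩
    · have hge : 10 ≤ n := by
        by_contra h
        exact h0 (Nat.div_eq_of_lt (by omega))
      have hfz : 0 < fuel := by
        rcases Nat.eq_zero_or_pos fuel with h | h
        · subst h; simp at hb; omega
        · exact h
      have hd : n / 10 < 10 ^ fuel := Nat.div_lt_of_lt_mul (by rw [← pow_succ']; exact hb)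
      obtain ⟨c, t, heq, hc⟩ := ih (n / 10) (Nat.digitChar (n % 10) :: ds) hfz hd
      refine ⟨c, t, by simp [h0, heq], Or.inr ⟨hge, ?_⟩⟩
      rcases hc with ⟨hlt, hcv, -⟩ | ⟨-, hne⟩
      · subst hcv
        have h1 : 1 ≤ n / 10 := by omega
        interval_cases h : (n / 10) <;> decide
      · exact hne

theorem pvToDigits_head (m : Nat) :
    ∃ c t, Nat.toDigits 10 m = c :: t ∧
      ((m < 10 ∧ c = Nat.digitChar m ∧ t = []) ∨ (10 ≤ m ∧ c ≠ '0')) := by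
  unfold Nat.toDigits
  exact pvToDigitsCore_head (m + 1) m [] (by omega)
    (lt_of_lt_of_le (Nat.lt_pow_self (by norm_num)) (Nat.pow_le_pow_right (by norm_num) (by omega)))

theorem pvToChars_ne_nil (n : Int) : PySem.Int.toChars n ≠ [] := by
  unfold PySem.Int.toChars
  split
  · simp
  · obtain ⟨c, t, heq, -⟩ := pvToDigits_head n.toNat
    simp [heq]

-- is_valid(a): len(a) == 1 or a[0] != '0'   (A never calls it on an empty string)
def pvIsValid (a : List Char) : Bool :=
  (a.length == 1) || !(PySem.List.pyGet? a 0 == some '0')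

-- helper(a, b, remaining) of A, literally
def pvHelper (x y rem : List Char) : Bool :=
  if !(pvIsValid x) || !(pvIsValid y) then false
  else
    let sv := PySem.Int.toChars ((PySem.Int.ofChars? x).getD 0 + (PySem.Int.ofChars? y).getD 0)
    if !(PySem.Chars.startswith rem sv) then false
    else if rem == sv then true
    else pvHelper y sv (PySem.List.slice rem (some (sv.length : Int)) none)
termination_by rem.length
decreasing_by
  rename_i sv h2 h3
  rw [PySem.List.slice_from_natCast]
  have hpre : sv <+: rem := (PySem.Chars.startswith_iff rem sv).mp (by simpa using h2)
  have hne : rem ≠ sv := by simpa using h3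
  have hlt : sv.length < rem.length := by
    rcases lt_or_eq_of_le hpre.length_le with h | h
    · exact h
    · exact absurd (hpre.eq_of_length h).symm hne
  have hnn : 0 < sv.length := List.length_pos_iff.mpr (pvToChars_ne_nil _)
  simp only [List.length_drop]
  show rem.length - sv.length < rem.length
  omega

def isSumString (s : String) : Bool :=
  (PySem.List.pyRange 1 (PySem.Str.len s) 1).any fun i =>
    (PySem.List.pyRange (i + 1) (PySem.Str.len s) 1).any fun j =>
      pvHelper (PySem.List.slice s.toList none (some i))
               (PySem.List.slice s.toList (some i) (some j))
               (PySem.List.slice s.toList (some j) none)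

-- ===== PORT B =====
-- len(b) > 1 and b[0] == '0'
def pvLeadZero (a : List Char) : Bool :=
  decide (1 < a.length) && (PySem.List.pyGet? a 0 == some '0')

-- the while-loop of B: extend t by successive sums until len(t) >= len(target), then compare
def pvGrow (x y t target : List Char) : Bool :=
  if h : t.length < target.length then
    let nxt := PySem.Int.toChars ((PySem.Int.ofChars? x).getD 0 + (PySem.Int.ofChars? y).getD 0)
    pvGrow y nxt (t ++ nxt) target
  else t == target
termination_by target.length - t.length
decreasing_by
  have hnn : 0 < (PySem.Int.toChars ((PySem.Int.ofChars? x).getD 0 + (PySem.Int.ofChars? y).getD 0)).length :=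
    List.length_pos_iff.mpr (pvToChars_ne_nil _)
  simp only [List.length_append]
  omega

def isSumString_alt (s : String) : Bool :=
  (PySem.List.pyRange 1 (PySem.Str.len s) 1).any fun i =>
    let a := PySem.List.slice s.toList none (some i)
    if pvLeadZero a then false
    else (PySem.List.pyRange (i + 1) (PySem.Str.len s) 1).any fun j =>
      let b := PySem.List.slice s.toList (some i) (some j)
      if pvLeadZero b then false
      else pvGrow a b (PySem.List.slice s.toList none (some j)) s.toList

-- ===== PRECONDITION & SPEC =====
-- Pre_ excludes strings of length ≥ 3 containing a non-digit character: on those int() makes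
-- Python's A raise ValueError as soon as a non-digit substring is converted (on a few of them,
-- e.g. "12a", every prefix test fails before any such conversion and A returns False, as does B).
def Pre_isSumString (s : String) : Prop :=
  s.toList.length ≤ 2 ∨ s.toList.all PySem.Chars.isdigit = true
instance (s : String) : Decidable (Pre_isSumString s) := by unfold Pre_isSumString; infer_instance

def pvWitness_isSumString : String := "1123"

def Spec_isSumString (s : String) (out : Bool) : Prop := out = isSumString_alt s
instance (s : String) (out : Bool) : Decidable (Spec_isSumString s out) := by
  unfold Spec_isSumString; infer_instance

-- ===== CLAIM (what is proved, stated in full; the proofs are below) =====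
def Claim_equal_isSumString : Prop :=
  ∀ (s : String), Dom_isSumString s → Pre_isSumString s → Spec_isSumString s (isSumString s)

-- ===== LEMMAS AND PROOFS =====

-- A's helper with the two leading-zero checks stripped off (they are absorbed below)
def pvCore (x y rem : List Char) : Bool :=
  let sv := PySem.Int.toChars ((PySem.Int.ofChars? x).getD 0 + (PySem.Int.ofChars? y).getD 0)
  if !(PySem.Chars.startswith rem sv) then false
  else if rem == sv then true
  else pvCore y sv (rem.drop sv.length)
termination_by rem.length
decreasing_by
  rename_i h2 h3
  have h2' : PySem.Chars.startswith rem
      (PySem.Int.toChars ((PySem.Int.ofChars? x).getD 0 + (PySem.Int.ofChars? y).getD 0)) = true := by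
    simpa using h2
  have h3' : rem ≠ PySem.Int.toChars ((PySem.Int.ofChars? x).getD 0 + (PySem.Int.ofChars? y).getD 0) := by
    simpa using h3
  have hpre := (PySem.Chars.startswith_iff rem _).mp h2'
  have hlt : (PySem.Int.toChars ((PySem.Int.ofChars? x).getD 0 + (PySem.Int.ofChars? y).getD 0)).length
      < rem.length := by
    rcases lt_or_eq_of_le hpre.length_le with h | h
    · exact h
    · exact absurd (hpre.eq_of_length h).symm h3'
  have hnn : 0 < (PySem.Int.toChars ((PySem.Int.ofChars? x).getD 0 + (PySem.Int.ofChars? y).getD 0)).length :=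
    List.length_pos_iff.mpr (pvToChars_ne_nil _)
  show (rem.drop (PySem.Int.toChars ((PySem.Int.ofChars? x).getD 0 + (PySem.Int.ofChars? y).getD 0)).length).length
      < rem.length
  simp only [List.length_drop]
  omega

-- str(n) never has a leading zero, so A's validity check accepts every later term
theorem pvIsValid_toChars (n : Int) : pvIsValid (PySem.Int.toChars n) = true := by
  unfold PySem.Int.toChars
  split
  · simp [pvIsValid, PySem.List.pyGet?, PySem.List.pyIdx?]
  · obtain ⟨c, t, heq, hc⟩ := pvToDigits_head n.toNat
    rw [heq]
    rcases hc with ⟨-, -, ht⟩ | ⟨-, hne⟩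
    · subst ht; simp [pvIsValid]
    · simp [pvIsValid, PySem.List.pyGet?, PySem.List.pyIdx?, hne]

theorem pvHelper_eq_core (rem x y : List Char) :
    pvHelper x y rem = (pvIsValid x && pvIsValid y && pvCore x y rem) := by
  induction hn : rem.length using Nat.strong_induction_on generalizing rem x y with
  | _ n ih =>
  subst hn
  rw [pvHelper, pvCore]
  by_cases hx : pvIsValid x = true
  · by_cases hy : pvIsValid y = true
    · simp only [hx, hy, Bool.not_true, Bool.false_or, Bool.true_and]
      by_cases hpre : PySem.Chars.startswith rem
          (PySem.Int.toChars ((PySem.Int.ofChars? x).getD 0 + (PySem.Int.ofChars? y).getD 0)) = true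
      · set sv := PySem.Int.toChars ((PySem.Int.ofChars? x).getD 0 + (PySem.Int.ofChars? y).getD 0) with hsv
        simp only [hpre, Bool.not_true]
        by_cases heq : rem = sv
        · simp [heq]
        · have hp : sv <+: rem := (PySem.Chars.startswith_iff rem sv).mp hpre
          have hlt : sv.length < rem.length := by
            rcases lt_or_eq_of_le hp.length_le with h | h
            · exact h
            · exact absurd (hp.eq_of_length h).symm heq
          have hq : (rem == sv) = false := by simp [heq]
          have hnn : 0 < sv.length := List.length_pos_iff.mpr (by rw [hsv]; exact pvToChars_ne_nil _)
          simp only [hq]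
          rw [PySem.List.slice_from_natCast]
          rw [ih (rem.drop sv.length).length (by simp only [List.length_drop]; omega) _ _ _ rfl]
          have hv : pvIsValid sv = true := by rw [hsv]; exact pvIsValid_toChars _
          simp [hy, hv]
      · simp [hpre]
    · simp [hx, hy]
  · simp [hx]

-- B's while-loop can only end in equality when it started from a prefix of the target
theorem pvGrow_prefix (x y t target : List Char) (h : pvGrow x y t target = true) :
    t <+: target := by
  induction hn : target.length - t.length using Nat.strong_induction_on generalizing x y t with
  | _ n ih =>
  subst hn
  rw [pvGrow] at h
  by_cases hlt : t.length < target.length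
  · rw [dif_pos hlt] at h
    have hnn : 0 < (PySem.Int.toChars ((PySem.Int.ofChars? x).getD 0 + (PySem.Int.ofChars? y).getD 0)).length :=
      List.length_pos_iff.mpr (pvToChars_ne_nil _)
    have hrec := ih (target.length - (t ++ PySem.Int.toChars ((PySem.Int.ofChars? x).getD 0 + (PySem.Int.ofChars? y).getD 0)).length)
      (by simp only [List.length_append]; omega) _ _ _ h rfl
    exact (List.prefix_append _ _).trans hrec
  · rw [dif_neg hlt] at h
    exact (beq_iff_eq.mp h) ▸ List.prefix_refl _

-- the key bridge: building forward from prefix p = consuming the remainder, term by term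
theorem pvGrow_eq_core (rem p x y : List Char) (hne : rem ≠ []) :
    pvGrow x y p (p ++ rem) = pvCore x y rem := by
  induction hn : rem.length using Nat.strong_induction_on generalizing rem p x y with
  | _ n ih =>
  subst hn
  have hrpos : 0 < rem.length := List.length_pos_iff.mpr hne
  rw [pvGrow, pvCore]
  rw [dif_pos (by simp only [List.length_append]; omega)]
  set sv := PySem.Int.toChars ((PySem.Int.ofChars? x).getD 0 + (PySem.Int.ofChars? y).getD 0) with hsv
  have hsvpos : 0 < sv.length := List.length_pos_iff.mpr (by rw [hsv]; exact pvToChars_ne_nil _)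
  by_cases hpre : sv <+: rem
  · have hstart : PySem.Chars.startswith rem sv = true := (PySem.Chars.startswith_iff rem sv).mpr hpre
    simp only [hstart, Bool.not_true]
    by_cases heq : rem = sv
    · subst heq
      rw [pvGrow]
      rw [dif_neg (by simp)]
      simp
    · obtain ⟨rem', hrem'⟩ := hpre
      have hrne : rem' ≠ [] := by
        rintro rfl
        exact heq (by simpa using hrem'.symm)
      have hassoc : p ++ rem = (p ++ sv) ++ rem' := by rw [← hrem', List.append_assoc]
      rw [hassoc]
      have hlen : rem'.length < rem.length := by
        have := congrArg List.length hrem'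
        simp only [List.length_append] at this
        omega
      rw [ih rem'.length hlen rem' (p ++ sv) y sv hrne rfl]
      have hdrop : rem.drop sv.length = rem' := by
        rw [← hrem']
        simp
      have hq : (rem == sv) = false := by simp [heq]
      simp only [hq, hdrop]
      simp
  · have hstart : (!PySem.Chars.startswith rem sv) = true := by
      rcases h : PySem.Chars.startswith rem sv with _ | _
      · rfl
      · exact absurd ((PySem.Chars.startswith_iff rem sv).mp h) hpre
    simp only [hstart, if_true]
    have hnotpre : ¬ ((p ++ sv) <+: (p ++ rem)) := fun hcon =>
      hpre ((List.prefix_append_right_inj p).mp hcon)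
    by_cases hlt : (p ++ sv).length < (p ++ rem).length
    · rcases h : pvGrow y sv (p ++ sv) (p ++ rem) with _ | _
      · rfl
      · exact absurd (pvGrow_prefix _ _ _ _ h) hnotpre
    · rw [pvGrow, dif_neg hlt]
      simp only [beq_eq_false_iff_ne, ne_eq]
      intro hcon
      exact hnotpre (hcon ▸ List.prefix_refl _)

-- on the nonempty slices both programs test, A's is_valid is the negation of B's guard
theorem pvIsValid_eq_not_leadZero (a : List Char) (h : a ≠ []) :
    pvIsValid a = !pvLeadZero a := by
  rcases a with _ | ⟨c, t⟩
  · exact absurd rfl h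
  · simp only [pvIsValid, pvLeadZero, PySem.List.pyGet?, PySem.List.pyIdx?]
    rcases t with _ | ⟨d, u⟩ <;> by_cases hc : c = '0' <;> simp [hc]

theorem pvAny_and_left {α : Type} (l : List α) (c : Bool) (f : α → Bool) :
    (l.any fun j => c && f j) = (c && l.any f) := by
  cases c <;> simp

theorem pvMain (s : String) : isSumString s = isSumString_alt s := by
  unfold isSumString isSumString_alt
  refine PySem.List.any_congr_mem ?_
  intro i hi
  obtain ⟨hi1, hi2⟩ := PySem.List.mem_pyRange_one.mp hi
  have hlen : PySem.Str.len s = (s.toList.length : Int) := by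
    simp [pysem]
  rw [hlen] at hi2
  have hi0 : 0 ≤ i := by omega
  have ha : PySem.List.slice s.toList none (some i) ≠ [] := by
    rw [PySem.List.slice_to _ hi0]
    rw [← List.length_pos_iff]
    simp only [List.length_take]
    omega
  have e1 : ∀ j ∈ PySem.List.pyRange (i + 1) (PySem.Str.len s) 1,
      pvHelper (PySem.List.slice s.toList none (some i))
               (PySem.List.slice s.toList (some i) (some j))
               (PySem.List.slice s.toList (some j) none)
      = ((!pvLeadZero (PySem.List.slice s.toList none (some i))) &&
         (pvIsValid (PySem.List.slice s.toList (some i) (some j)) &&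
          pvCore (PySem.List.slice s.toList none (some i))
                 (PySem.List.slice s.toList (some i) (some j))
                 (PySem.List.slice s.toList (some j) none))) := by
    intro j _
    rw [pvHelper_eq_core, pvIsValid_eq_not_leadZero _ ha, Bool.and_assoc]
  rw [PySem.List.any_congr_mem e1, pvAny_and_left]
  rcases hla : pvLeadZero (PySem.List.slice s.toList none (some i)) with _ | _
  · simp only [hla, Bool.not_false, Bool.true_and]
    refine PySem.List.any_congr_mem ?_
    intro j hj
    obtain ⟨hj1, hj2⟩ := PySem.List.mem_pyRange_one.mp hj
    rw [hlen] at hj2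
    have hj0 : 0 ≤ j := by omega
    have hb : PySem.List.slice s.toList (some i) (some j) ≠ [] := by
      rw [PySem.List.slice_toNat _ hi0 hj0]
      rw [← List.length_pos_iff]
      simp only [List.length_take, List.length_drop]
      omega
    rw [pvIsValid_eq_not_leadZero _ hb]
    have hgrow : pvGrow (PySem.List.slice s.toList none (some i))
        (PySem.List.slice s.toList (some i) (some j))
        (PySem.List.slice s.toList none (some j)) s.toList
        = pvCore (PySem.List.slice s.toList none (some i))
            (PySem.List.slice s.toList (some i) (some j))
            (PySem.List.slice s.toList (some j) none) := by
      rw [PySem.List.slice_to _ hj0, PySem.List.slice_from _ hj0]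
      have hne : s.toList.drop j.toNat ≠ [] := by
        rw [← List.length_pos_iff]
        simp only [List.length_drop]
        omega
      have h0 := pvGrow_eq_core (s.toList.drop j.toNat) (s.toList.take j.toNat)
        (PySem.List.slice s.toList none (some i)) (PySem.List.slice s.toList (some i) (some j)) hne
      rwa [List.take_append_drop] at h0
    rcases hlb : pvLeadZero (PySem.List.slice s.toList (some i) (some j)) with _ | _
    · simp [hgrow]
    · simp
  · simp [hla]

-- ===== VERDICT (by name: the statement is the Claim_ definition above) =====
theorem isSumString_spec : Claim_equal_isSumString := by
  intro s _hdom _hpre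
  unfold Spec_isSumString
  exact pvMain s
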